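-- pv_equiv track=rewrite | github.com/l-yc/hack-mit-2025 | backend/backend.py | parse_song_text_response
-- ===== SOURCE A (Python) =====
-- def parse_song_text_response(songs_text):
--     """Fallback parser for non-JSON song responses"""
--     songs = []
--     lines = songs_text.split('\n')
--
--     current_song = {}
--     for line in lines:
--         line = line.strip()
--         if 'title:' in line.lower() or 'song:' in line.lower():
--             if current_song:
--                 songs.append(current_song)
--             current_song = {"title": line.split(':', 1)[1].strip()}
--         elif 'artist:' in line.lower():
--             current_song["artist"] = line.split(':', 1)[1].strip()
--         elif 'genre:' in line.lower():
--             current_song["genre"] = line.split(':', 1)[1].strip()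
--         elif 'reason:' in line.lower() or 'coherence:' in line.lower():
--             current_song["coherence_reason"] = line.split(':', 1)[1].strip()
--
--     if current_song:
--         songs.append(current_song)
--
--     return songs
-- ===== SOURCE B (Python) =====
-- def parse_song_text_response(songs_text):
--     """Fallback parser for non-JSON song responses (block-partition rewrite)"""
--     stripped = [l.strip() for l in songs_text.split('\n')]
--
--     def is_title(l):
--         low = l.lower()
--         return 'title:' in low or 'song:' in low
--
--     # Pass 1: partition the stripped lines into blocks, a new block per title line.
--     blocks = []
--     current = []
--     for l in stripped:
--         if is_title(l):
--             blocks.append(current)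
--             current = [l]
--         else:
--             current.append(l)
--     blocks.append(current)
--
--     # Pass 2: turn each block into a song dict; keep only non-empty dicts.
--     def to_song(block):
--         song = {}
--         rest = block
--         if block and is_title(block[0]):
--             song['title'] = block[0].split(':', 1)[1].strip()
--             rest = block[1:]
--         for l in rest:
--             low = l.lower()
--             if 'artist:' in low:
--                 song['artist'] = l.split(':', 1)[1].strip()
--             elif 'genre:' in low:
--                 song['genre'] = l.split(':', 1)[1].strip()
--             elif 'reason:' in low or 'coherence:' in low:
--                 song['coherence_reason'] = l.split(':', 1)[1].strip()
--         return song
--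
--     return [s for s in map(to_song, blocks) if s]
-- ===== Notes on version B (the rewrite author's own statement) =====
-- stated objective: alternative
-- what changed: Replaced A's single interleaved accumulate-and-flush loop over lines with a two-pass decomposition: first partition the stripped lines into blocks that start at each title line, then map each block to a song dict and keep the non-empty ones.
import Mathlib
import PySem

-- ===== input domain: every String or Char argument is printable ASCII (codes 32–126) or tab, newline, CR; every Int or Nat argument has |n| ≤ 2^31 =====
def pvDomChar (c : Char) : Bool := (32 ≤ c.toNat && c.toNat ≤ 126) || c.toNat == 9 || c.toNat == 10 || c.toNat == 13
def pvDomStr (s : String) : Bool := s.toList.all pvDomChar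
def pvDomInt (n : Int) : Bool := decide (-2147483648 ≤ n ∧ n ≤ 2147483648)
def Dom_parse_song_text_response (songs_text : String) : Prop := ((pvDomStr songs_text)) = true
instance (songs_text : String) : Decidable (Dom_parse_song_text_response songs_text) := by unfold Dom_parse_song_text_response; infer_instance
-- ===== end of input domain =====

-- B is a two-pass re-decomposition (partition lines into title-blocks, then map each block to a dict);
-- same cost as A's interleaved accumulate-and-flush loop — objective: alternative decomposition.

-- line.split(':', 1)[1]  (both Pythons use this exact expression; only reached when the line contains ':')
def pvAfterColon (l : String) : String :=
  ((PySem.Str.splitMax? l ":" 1).getD []).getD 1 ""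

-- ===== PORT A =====
-- loop body of A on the already-stripped line (A strips first, then dispatches)
def pvStepACore (st : List (PySem.Dict String String) × PySem.Dict String String) (line : String) :
    List (PySem.Dict String String) × PySem.Dict String String :=
  let low := PySem.Str.lower line
  if PySem.Str.isIn "title:" low || PySem.Str.isIn "song:" low then
    let songs := if st.2.items.isEmpty then st.1 else st.1 ++ [st.2]
    (songs, (PySem.Dict.empty).insert "title" (PySem.Str.strip (pvAfterColon line)))
  else if PySem.Str.isIn "artist:" low then
    (st.1, st.2.insert "artist" (PySem.Str.strip (pvAfterColon line)))
  else if PySem.Str.isIn "genre:" low then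
    (st.1, st.2.insert "genre" (PySem.Str.strip (pvAfterColon line)))
  else if PySem.Str.isIn "reason:" low || PySem.Str.isIn "coherence:" low then
    (st.1, st.2.insert "coherence_reason" (PySem.Str.strip (pvAfterColon line)))
  else st

def pvStepA (st : List (PySem.Dict String String) × PySem.Dict String String) (line : String) :
    List (PySem.Dict String String) × PySem.Dict String String :=
  pvStepACore st (PySem.Str.strip line)

def parse_song_text_response (songs_text : String) : List (List (String × String)) :=
  let lines := (PySem.Str.split? songs_text "\n").getD []
  let st := lines.foldl pvStepA ([], PySem.Dict.empty)
  let songs := if st.2.items.isEmpty then st.1 else st.1 ++ [st.2]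
  songs.map (·.items)

-- ===== PORT B =====
def pvIsTitle (l : String) : Bool :=
  let low := PySem.Str.lower l
  PySem.Str.isIn "title:" low || PySem.Str.isIn "song:" low

-- pass 1 step: start a new block on a title line, else extend the current block
def pvStepB (st : List (List String) × List String) (l : String) :
    List (List String) × List String :=
  if pvIsTitle l then (st.1 ++ [st.2], [l]) else (st.1, st.2 ++ [l])

-- pass 2, per non-title line of a block
def pvFieldStep (song : PySem.Dict String String) (l : String) : PySem.Dict String String :=
  let low := PySem.Str.lower l
  if PySem.Str.isIn "artist:" low then
    song.insert "artist" (PySem.Str.strip (pvAfterColon l))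
  else if PySem.Str.isIn "genre:" low then
    song.insert "genre" (PySem.Str.strip (pvAfterColon l))
  else if PySem.Str.isIn "reason:" low || PySem.Str.isIn "coherence:" low then
    song.insert "coherence_reason" (PySem.Str.strip (pvAfterColon l))
  else song

def pvToSong (block : List String) : PySem.Dict String String :=
  let seeded :=
    match block with
    | b0 :: bs =>
      if pvIsTitle b0 then
        ((PySem.Dict.empty).insert "title" (PySem.Str.strip (pvAfterColon b0)), bs)
      else (PySem.Dict.empty, block)
    | [] => (PySem.Dict.empty, block)
  seeded.2.foldl pvFieldStep seeded.1

def parse_song_text_response_alt (songs_text : String) : List (List (String × String)) :=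
  let stripped := ((PySem.Str.split? songs_text "\n").getD []).map PySem.Str.strip
  let st := stripped.foldl pvStepB ([], [])
  let blocks := st.1 ++ [st.2]
  (((blocks.map pvToSong).filter (fun s => !s.items.isEmpty)).map (·.items))

-- ===== PRECONDITION & SPEC =====
def Spec_parse_song_text_response (songs_text : String) (out : List (List (String × String))) : Prop := out = parse_song_text_response_alt songs_text
instance (songs_text : String) (out : List (List (String × String))) : Decidable (Spec_parse_song_text_response songs_text out) := by unfold Spec_parse_song_text_response; infer_instance

-- ===== CLAIM (what is proved, stated in full; the proofs are below) =====
def Claim_equal_parse_song_text_response : Prop := ∀ (songs_text : String), Dom_parse_song_text_response songs_text → Spec_parse_song_text_response songs_text (parse_song_text_response songs_text)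

-- ===== LEMMAS AND PROOFS =====

-- the dicts a tail of stripped lines will emit, given the dict accumulated so far
def pvFlushOne (d : PySem.Dict String String) : List (PySem.Dict String String) :=
  if d.items.isEmpty then [] else [d]

def pvEmit (d : PySem.Dict String String) : List String → List (PySem.Dict String String)
  | [] => pvFlushOne d
  | l :: ls =>
    if pvIsTitle l then
      pvFlushOne d ++ pvEmit ((PySem.Dict.empty).insert "title" (PySem.Str.strip (pvAfterColon l))) ls
    else pvEmit (pvFieldStep d l) ls

lemma pvStepACore_title (st : List (PySem.Dict String String) × PySem.Dict String String)
    (l : String) (h : pvIsTitle l = true) :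
    pvStepACore st l = (st.1 ++ pvFlushOne st.2,
      (PySem.Dict.empty).insert "title" (PySem.Str.strip (pvAfterColon l))) := by
  simp only [pvIsTitle] at h
  simp only [pvStepACore, pvFlushOne, h, if_pos]
  split_ifs <;> simp_all

lemma pvStepACore_nonTitle (st : List (PySem.Dict String String) × PySem.Dict String String)
    (l : String) (h : pvIsTitle l = false) :
    pvStepACore st l = (st.1, pvFieldStep st.2 l) := by
  simp only [pvIsTitle] at h
  simp only [pvStepACore, pvFieldStep, h]
  split_ifs <;> simp_all

lemma pvFoldA (ls : List String) :
    ∀ (songs : List (PySem.Dict String String)) (d : PySem.Dict String String),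
    (if (ls.foldl pvStepACore (songs, d)).2.items.isEmpty then (ls.foldl pvStepACore (songs, d)).1
     else (ls.foldl pvStepACore (songs, d)).1 ++ [(ls.foldl pvStepACore (songs, d)).2]) =
      songs ++ pvEmit d ls := by
  induction ls with
  | nil => intro songs d; simp [pvEmit, pvFlushOne]; split <;> simp
  | cons l ls ih =>
    intro songs d
    by_cases h : pvIsTitle l = true
    · simp only [List.foldl_cons, pvStepACore_title _ _ h, pvEmit, h, if_pos]
      rw [ih]; simp [List.append_assoc]
    · simp only [Bool.not_eq_true] at h
      simp only [List.foldl_cons, pvStepACore_nonTitle _ _ h, pvEmit, h]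
      rw [ih]; simp

-- emitted dicts of pass 2, phrased on the current BLOCK (B's shape)
def pvEmitB (b : List String) : List String → List (PySem.Dict String String)
  | [] => pvFlushOne (pvToSong b)
  | l :: ls =>
    if pvIsTitle l then pvFlushOne (pvToSong b) ++ pvEmitB [l] ls
    else pvEmitB (b ++ [l]) ls

lemma pvFoldB (ls : List String) :
    ∀ (bs : List (List String)) (b : List String),
    ((((ls.foldl pvStepB (bs, b)).1 ++ [(ls.foldl pvStepB (bs, b)).2]).map pvToSong).filter
        (fun s => !s.items.isEmpty)) =
      ((bs.map pvToSong).filter (fun s => !s.items.isEmpty)) ++ pvEmitB b ls := by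
  induction ls with
  | nil =>
    intro bs b
    simp [pvEmitB, pvFlushOne, List.filter_append]
    split <;> simp_all
  | cons l ls ih =>
    intro bs b
    by_cases h : pvIsTitle l = true
    · simp only [List.foldl_cons, pvStepB, h, if_pos, pvEmitB]
      rw [ih]
      simp [List.filter_append, pvFlushOne, List.append_assoc]
      split <;> simp_all
    · simp only [Bool.not_eq_true] at h
      simp only [List.foldl_cons, pvStepB, h, Bool.false_eq_true, if_false, pvEmitB]
      rw [ih]

lemma pvToSong_nil : pvToSong [] = PySem.Dict.empty := rfl

lemma pvToSong_title (l : String) (h : pvIsTitle l = true) :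
    pvToSong [l] = (PySem.Dict.empty).insert "title" (PySem.Str.strip (pvAfterColon l)) := by
  simp [pvToSong, h]

lemma pvToSong_snoc (b : List String) (l : String) (h : pvIsTitle l = false) :
    pvToSong (b ++ [l]) = pvFieldStep (pvToSong b) l := by
  cases b with
  | nil => simp [pvToSong, h]
  | cons b0 bs =>
    simp only [pvToSong, List.cons_append]
    split_ifs <;> simp [List.foldl_append]

lemma pvEmitB_eq_pvEmit (ls : List String) :
    ∀ b : List String, pvEmitB b ls = pvEmit (pvToSong b) ls := by
  induction ls with
  | nil => intro b; rfl
  | cons l ls ih =>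
    intro b
    by_cases h : pvIsTitle l = true
    · simp only [pvEmitB, pvEmit, h, if_pos, ih, pvToSong_title l h]
    · simp only [Bool.not_eq_true] at h
      simp only [pvEmitB, pvEmit, h, Bool.false_eq_true, if_false, ih, pvToSong_snoc b l h]

-- ===== VERDICT (by name: the statement is the Claim_ definition above) =====
theorem parse_song_text_response_spec : Claim_equal_parse_song_text_response := by
  intro s _
  show parse_song_text_response s = parse_song_text_response_alt s
  simp only [parse_song_text_response, parse_song_text_response_alt]
  rw [show ((PySem.Str.split? s "\n").getD []).foldl pvStepA ([], PySem.Dict.empty) =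
        (((PySem.Str.split? s "\n").getD []).map PySem.Str.strip).foldl pvStepACore ([], PySem.Dict.empty)
      from by rw [List.foldl_map]; congr 1]
  rw [pvFoldA, pvFoldB, pvEmitB_eq_pvEmit, pvToSong_nil]
  simp
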